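-- pv_equiv track=rewrite | github.com/deepak16686/myfirstrepository | dev-stack/backend/app/services/github_pipeline/analyzer.py | _detect_package_manager
-- ===== SOURCE A (Python) =====
-- from typing import Dict, Any, List
--
-- def _detect_package_manager(files: List[str]) -> str:
--     """Detect package manager"""
--     file_set = set(f.lower() for f in files)
--
--     if "yarn.lock" in file_set:
--         return "yarn"
--     if "package-lock.json" in file_set:
--         return "npm"
--     if "pnpm-lock.yaml" in file_set:
--         return "pnpm"
--     if "poetry.lock" in file_set:
--         return "poetry"
--     if "pipfile.lock" in file_set:
--         return "pipenv"
--     if "requirements.txt" in file_set: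
--         return "pip"
--     if "build.gradle" in file_set:
--         return "gradle"
--     if "pom.xml" in file_set:
--         return "maven"
--
--     return "unknown"
-- ===== SOURCE B (Python) =====
-- from typing import Dict, Any, List
--
-- _RANK = {
--     "yarn.lock": 0,
--     "package-lock.json": 1,
--     "pnpm-lock.yaml": 2,
--     "poetry.lock": 3,
--     "pipfile.lock": 4,
--     "requirements.txt": 5,
--     "build.gradle": 6,
--     "pom.xml": 7,
-- }
-- _NAMES = ["yarn", "npm", "pnpm", "poetry", "pipenv", "pip", "gradle", "maven"]
--
-- def _detect_package_manager(files: List[str]) -> str: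
--     """Detect package manager: one pass keeping the best (smallest) priority seen."""
--     best = 8
--     for f in files:
--         r = _RANK.get(f.lower(), 8)
--         if r < best:
--             best = r
--     return _NAMES[best] if best < 8 else "unknown"
-- ===== Notes on version B (the rewrite author's own statement) =====
-- stated objective: alternative
-- what changed: Replaced 'build a lowercase set, then eight sequential membership probes' by a single pass over the input that keeps the smallest priority rank seen (via a name-to-rank dict) and maps the best rank back to a manager name.
import Mathlib
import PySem

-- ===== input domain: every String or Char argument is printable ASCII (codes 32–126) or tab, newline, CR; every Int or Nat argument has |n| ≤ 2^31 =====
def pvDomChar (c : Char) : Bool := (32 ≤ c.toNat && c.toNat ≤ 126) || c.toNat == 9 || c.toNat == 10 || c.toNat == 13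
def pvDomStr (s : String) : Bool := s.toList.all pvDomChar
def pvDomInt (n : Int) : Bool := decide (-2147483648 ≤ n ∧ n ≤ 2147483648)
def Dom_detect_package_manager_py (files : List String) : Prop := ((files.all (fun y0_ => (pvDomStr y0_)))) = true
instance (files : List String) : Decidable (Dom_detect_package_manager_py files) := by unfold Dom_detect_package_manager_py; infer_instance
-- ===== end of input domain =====

-- B replaces A's lowercase-set + eight sequential membership probes by one pass over the
-- input keeping the smallest priority rank seen (alternative decomposition, same cost).

-- ===== PORT A =====
def detect_package_manager_py (files : List String) : String :=
  let file_set : PySem.Set String := PySem.Set.ofList (files.map (fun f => PySem.Str.lower f))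
  if PySem.Set.contains file_set "yarn.lock" then "yarn"
  else if PySem.Set.contains file_set "package-lock.json" then "npm"
  else if PySem.Set.contains file_set "pnpm-lock.yaml" then "pnpm"
  else if PySem.Set.contains file_set "poetry.lock" then "poetry"
  else if PySem.Set.contains file_set "pipfile.lock" then "pipenv"
  else if PySem.Set.contains file_set "requirements.txt" then "pip"
  else if PySem.Set.contains file_set "build.gradle" then "gradle"
  else if PySem.Set.contains file_set "pom.xml" then "maven"
  else "unknown"

-- ===== PORT B =====
def pvRank : PySem.Dict String Nat := PySem.Dict.ofList
  [("yarn.lock", 0), ("package-lock.json", 1), ("pnpm-lock.yaml", 2), ("poetry.lock", 3),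
   ("pipfile.lock", 4), ("requirements.txt", 5), ("build.gradle", 6), ("pom.xml", 7)]

def pvNames : List String := ["yarn", "npm", "pnpm", "poetry", "pipenv", "pip", "gradle", "maven"]

def detect_package_manager_py_alt (files : List String) : String :=
  let best := files.foldl (fun best f =>
    let r := pvRank.getD (PySem.Str.lower f) 8
    if r < best then r else best) 8
  if best < 8 then pvNames.getD best "unknown" else "unknown"

-- ===== PRECONDITION & SPEC =====
def Spec_detect_package_manager_py (files : List String) (out : String) : Prop := out = detect_package_manager_py_alt files
instance (files : List String) (out : String) : Decidable (Spec_detect_package_manager_py files out) := by unfold Spec_detect_package_manager_py; infer_instance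

-- ===== CLAIM (what is proved, stated in full; the proofs are below) =====
def Claim_equal_detect_package_manager_py : Prop := ∀ (files : List String), Dom_detect_package_manager_py files → Spec_detect_package_manager_py files (detect_package_manager_py files)

-- ===== LEMMAS AND PROOFS =====

-- the rank of one file name, as B computes it
def pvRankD (f : String) : Nat := pvRank.getD (PySem.Str.lower f) 8

-- B's loop body; B's best = files.foldl pvStep 8
def pvStep (b : Nat) (f : String) : Nat := if pvRankD f < b then pvRankD f else b

theorem pv_fold_le_init (fs : List String) (b : Nat) : fs.foldl pvStep b ≤ b := by
  induction fs generalizing b with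
  | nil => simp
  | cons f fs ih =>
    simp only [List.foldl_cons]
    exact le_trans (ih _) (by simp only [pvStep]; split <;> omega)

theorem pv_fold_le (fs : List String) (b : Nat) (f : String) (hf : f ∈ fs) :
    fs.foldl pvStep b ≤ pvRankD f := by
  induction fs generalizing b with
  | nil => cases hf
  | cons g fs ih =>
    simp only [List.foldl_cons]
    rcases List.mem_cons.mp hf with h | h
    · subst h
      exact le_trans (pv_fold_le_init _ _) (by simp only [pvStep]; split <;> omega)
    · exact ih _ h

theorem pv_fold_cases (fs : List String) (b : Nat) :
    fs.foldl pvStep b = b ∨ ∃ f ∈ fs, pvRankD f = fs.foldl pvStep b := by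
  induction fs generalizing b with
  | nil => left; rfl
  | cons g fs ih =>
    simp only [List.foldl_cons]
    rcases ih (pvStep b g) with h | ⟨f, hf, hr⟩
    · rw [h]
      unfold pvStep
      split
      · right; exact ⟨g, List.mem_cons_self .., rfl⟩
      · left; rfl
    · right; exact ⟨f, List.mem_cons_of_mem _ hf, hr⟩

-- pvRank.getD as a chain of string comparisons
theorem pvRank_getD (s : String) :
    pvRank.getD s 8 =
      (       if "yarn.lock" = s then 0
       else if "package-lock.json" = s then 1
       else if "pnpm-lock.yaml" = s then 2
       else if "poetry.lock" = s then 3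
       else if "pipfile.lock" = s then 4
       else if "requirements.txt" = s then 5
       else if "build.gradle" = s then 6
       else if "pom.xml" = s then 7
       else 8) := by
  have hmk : pvRank = PySem.Dict.mk
      [("yarn.lock", 0), ("package-lock.json", 1), ("pnpm-lock.yaml", 2), ("poetry.lock", 3),
       ("pipfile.lock", 4), ("requirements.txt", 5), ("build.gradle", 6), ("pom.xml", 7)] := by decide
  rw [hmk]
  simp only [PySem.Dict.getD, PySem.Dict.get?_mk_cons, beq_iff_eq]
  split_ifs <;> simp [PySem.Dict.get?]

theorem pvRankD_eq (f : String) :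
    pvRankD f =
      (       if "yarn.lock" = PySem.Str.lower f then 0
       else if "package-lock.json" = PySem.Str.lower f then 1
       else if "pnpm-lock.yaml" = PySem.Str.lower f then 2
       else if "poetry.lock" = PySem.Str.lower f then 3
       else if "pipfile.lock" = PySem.Str.lower f then 4
       else if "requirements.txt" = PySem.Str.lower f then 5
       else if "build.gradle" = PySem.Str.lower f then 6
       else if "pom.xml" = PySem.Str.lower f then 7
       else 8) := by
  unfold pvRankD
  rw [pvRank_getD]

theorem pvRankD_inv_0 (g : String) (h : pvRankD g = 0) : PySem.Str.lower g = "yarn.lock" := by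
  rw [pvRankD_eq] at h
  split_ifs at h
  simp_all

theorem pvRankD_fwd_0 (g : String) (h : PySem.Str.lower g = "yarn.lock") : pvRankD g = 0 := by
  rw [pvRankD_eq, h]; decide

theorem pvRankD_inv_1 (g : String) (h : pvRankD g = 1) : PySem.Str.lower g = "package-lock.json" := by
  rw [pvRankD_eq] at h; split_ifs at h <;> simp_all

theorem pvRankD_fwd_1 (g : String) (h : PySem.Str.lower g = "package-lock.json") : pvRankD g = 1 := by
  rw [pvRankD_eq, h]; decide

theorem pvRankD_inv_2 (g : String) (h : pvRankD g = 2) : PySem.Str.lower g = "pnpm-lock.yaml" := by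
  rw [pvRankD_eq] at h; split_ifs at h <;> simp_all

theorem pvRankD_fwd_2 (g : String) (h : PySem.Str.lower g = "pnpm-lock.yaml") : pvRankD g = 2 := by
  rw [pvRankD_eq, h]; decide

theorem pvRankD_inv_3 (g : String) (h : pvRankD g = 3) : PySem.Str.lower g = "poetry.lock" := by
  rw [pvRankD_eq] at h; split_ifs at h <;> simp_all

theorem pvRankD_fwd_3 (g : String) (h : PySem.Str.lower g = "poetry.lock") : pvRankD g = 3 := by
  rw [pvRankD_eq, h]; decide

theorem pvRankD_inv_4 (g : String) (h : pvRankD g = 4) : PySem.Str.lower g = "pipfile.lock" := by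
  rw [pvRankD_eq] at h; split_ifs at h <;> simp_all

theorem pvRankD_fwd_4 (g : String) (h : PySem.Str.lower g = "pipfile.lock") : pvRankD g = 4 := by
  rw [pvRankD_eq, h]; decide

theorem pvRankD_inv_5 (g : String) (h : pvRankD g = 5) : PySem.Str.lower g = "requirements.txt" := by
  rw [pvRankD_eq] at h; split_ifs at h <;> simp_all

theorem pvRankD_fwd_5 (g : String) (h : PySem.Str.lower g = "requirements.txt") : pvRankD g = 5 := by
  rw [pvRankD_eq, h]; decide

theorem pvRankD_inv_6 (g : String) (h : pvRankD g = 6) : PySem.Str.lower g = "build.gradle" := by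
  rw [pvRankD_eq] at h; split_ifs at h <;> simp_all

theorem pvRankD_fwd_6 (g : String) (h : PySem.Str.lower g = "build.gradle") : pvRankD g = 6 := by
  rw [pvRankD_eq, h]; decide

theorem pvRankD_inv_7 (g : String) (h : pvRankD g = 7) : PySem.Str.lower g = "pom.xml" := by
  rw [pvRankD_eq] at h; split_ifs at h <;> simp_all

theorem pvRankD_fwd_7 (g : String) (h : PySem.Str.lower g = "pom.xml") : pvRankD g = 7 := by
  rw [pvRankD_eq, h]; decide

theorem detect_package_manager_py_spec : Claim_equal_detect_package_manager_py := by
  intro files _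
  unfold Spec_detect_package_manager_py
  have ha : detect_package_manager_py files =
      (if "yarn.lock" ∈ files.map (fun f => PySem.Str.lower f) then "yarn" else (if "package-lock.json" ∈ files.map (fun f => PySem.Str.lower f) then "npm" else (if "pnpm-lock.yaml" ∈ files.map (fun f => PySem.Str.lower f) then "pnpm" else (if "poetry.lock" ∈ files.map (fun f => PySem.Str.lower f) then "poetry" else (if "pipfile.lock" ∈ files.map (fun f => PySem.Str.lower f) then "pipenv" else (if "requirements.txt" ∈ files.map (fun f => PySem.Str.lower f) then "pip" else (if "build.gradle" ∈ files.map (fun f => PySem.Str.lower f) then "gradle" else (if "pom.xml" ∈ files.map (fun f => PySem.Str.lower f) then "maven" else ("unknown"))))))))) := by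
    simp only [detect_package_manager_py, PySem.Set.contains_iff, PySem.Set.mem_ofList]
  have hb : detect_package_manager_py_alt files =
      (if files.foldl pvStep 8 < 8 then pvNames.getD (files.foldl pvStep 8) "unknown" else "unknown") := rfl
  rw [ha, hb]
  by_cases c0 : "yarn.lock" ∈ files.map (fun f => PySem.Str.lower f)
  · have hm : files.foldl pvStep 8 = 0 := by
      obtain ⟨f, hf, hlf⟩ := List.mem_map.mp c0
      have hle : files.foldl pvStep 8 ≤ 0 := by
        have h1 := pv_fold_le files 8 f hf
        rwa [pvRankD_fwd_0 f hlf] at h1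
      omega
    rw [hm]
    simp only [if_pos c0]
    decide
  by_cases c1 : "package-lock.json" ∈ files.map (fun f => PySem.Str.lower f)
  · have hm : files.foldl pvStep 8 = 1 := by
      obtain ⟨f, hf, hlf⟩ := List.mem_map.mp c1
      have hle : files.foldl pvStep 8 ≤ 1 := by
        have h1 := pv_fold_le files 8 f hf
        rwa [pvRankD_fwd_1 f hlf] at h1
      have hne0 : files.foldl pvStep 8 ≠ 0 := by
        intro hmj
        rcases pv_fold_cases files 8 with h8 | ⟨g, hg, hrg⟩
        · omega
        · exact c0 (List.mem_map.mpr ⟨g, hg, pvRankD_inv_0 g (hrg.trans hmj)⟩)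
      omega
    rw [hm]
    simp only [if_pos c1, if_neg c0]
    decide
  by_cases c2 : "pnpm-lock.yaml" ∈ files.map (fun f => PySem.Str.lower f)
  · have hm : files.foldl pvStep 8 = 2 := by
      obtain ⟨f, hf, hlf⟩ := List.mem_map.mp c2
      have hle : files.foldl pvStep 8 ≤ 2 := by
        have h1 := pv_fold_le files 8 f hf
        rwa [pvRankD_fwd_2 f hlf] at h1
      have hne0 : files.foldl pvStep 8 ≠ 0 := by
        intro hmj
        rcases pv_fold_cases files 8 with h8 | ⟨g, hg, hrg⟩
        · omega
        · exact c0 (List.mem_map.mpr ⟨g, hg, pvRankD_inv_0 g (hrg.trans hmj)⟩)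
      have hne1 : files.foldl pvStep 8 ≠ 1 := by
        intro hmj
        rcases pv_fold_cases files 8 with h8 | ⟨g, hg, hrg⟩
        · omega
        · exact c1 (List.mem_map.mpr ⟨g, hg, pvRankD_inv_1 g (hrg.trans hmj)⟩)
      omega
    rw [hm]
    simp only [if_pos c2, if_neg c0, if_neg c1]
    decide
  by_cases c3 : "poetry.lock" ∈ files.map (fun f => PySem.Str.lower f)
  · have hm : files.foldl pvStep 8 = 3 := by
      obtain ⟨f, hf, hlf⟩ := List.mem_map.mp c3
      have hle : files.foldl pvStep 8 ≤ 3 := by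
        have h1 := pv_fold_le files 8 f hf
        rwa [pvRankD_fwd_3 f hlf] at h1
      have hne0 : files.foldl pvStep 8 ≠ 0 := by
        intro hmj
        rcases pv_fold_cases files 8 with h8 | ⟨g, hg, hrg⟩
        · omega
        · exact c0 (List.mem_map.mpr ⟨g, hg, pvRankD_inv_0 g (hrg.trans hmj)⟩)
      have hne1 : files.foldl pvStep 8 ≠ 1 := by
        intro hmj
        rcases pv_fold_cases files 8 with h8 | ⟨g, hg, hrg⟩
        · omega
        · exact c1 (List.mem_map.mpr ⟨g, hg, pvRankD_inv_1 g (hrg.trans hmj)⟩)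
      have hne2 : files.foldl pvStep 8 ≠ 2 := by
        intro hmj
        rcases pv_fold_cases files 8 with h8 | ⟨g, hg, hrg⟩
        · omega
        · exact c2 (List.mem_map.mpr ⟨g, hg, pvRankD_inv_2 g (hrg.trans hmj)⟩)
      omega
    rw [hm]
    simp only [if_pos c3, if_neg c0, if_neg c1, if_neg c2]
    decide
  by_cases c4 : "pipfile.lock" ∈ files.map (fun f => PySem.Str.lower f)
  · have hm : files.foldl pvStep 8 = 4 := by
      obtain ⟨f, hf, hlf⟩ := List.mem_map.mp c4
      have hle : files.foldl pvStep 8 ≤ 4 := by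
        have h1 := pv_fold_le files 8 f hf
        rwa [pvRankD_fwd_4 f hlf] at h1
      have hne0 : files.foldl pvStep 8 ≠ 0 := by
        intro hmj
        rcases pv_fold_cases files 8 with h8 | ⟨g, hg, hrg⟩
        · omega
        · exact c0 (List.mem_map.mpr ⟨g, hg, pvRankD_inv_0 g (hrg.trans hmj)⟩)
      have hne1 : files.foldl pvStep 8 ≠ 1 := by
        intro hmj
        rcases pv_fold_cases files 8 with h8 | ⟨g, hg, hrg⟩
        · omega
        · exact c1 (List.mem_map.mpr ⟨g, hg, pvRankD_inv_1 g (hrg.trans hmj)⟩)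
      have hne2 : files.foldl pvStep 8 ≠ 2 := by
        intro hmj
        rcases pv_fold_cases files 8 with h8 | ⟨g, hg, hrg⟩
        · omega
        · exact c2 (List.mem_map.mpr ⟨g, hg, pvRankD_inv_2 g (hrg.trans hmj)⟩)
      have hne3 : files.foldl pvStep 8 ≠ 3 := by
        intro hmj
        rcases pv_fold_cases files 8 with h8 | ⟨g, hg, hrg⟩
        · omega
        · exact c3 (List.mem_map.mpr ⟨g, hg, pvRankD_inv_3 g (hrg.trans hmj)⟩)
      omega
    rw [hm]
    simp only [if_pos c4, if_neg c0, if_neg c1, if_neg c2, if_neg c3]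
    decide
  by_cases c5 : "requirements.txt" ∈ files.map (fun f => PySem.Str.lower f)
  · have hm : files.foldl pvStep 8 = 5 := by
      obtain ⟨f, hf, hlf⟩ := List.mem_map.mp c5
      have hle : files.foldl pvStep 8 ≤ 5 := by
        have h1 := pv_fold_le files 8 f hf
        rwa [pvRankD_fwd_5 f hlf] at h1
      have hne0 : files.foldl pvStep 8 ≠ 0 := by
        intro hmj
        rcases pv_fold_cases files 8 with h8 | ⟨g, hg, hrg⟩
        · omega
        · exact c0 (List.mem_map.mpr ⟨g, hg, pvRankD_inv_0 g (hrg.trans hmj)⟩)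
      have hne1 : files.foldl pvStep 8 ≠ 1 := by
        intro hmj
        rcases pv_fold_cases files 8 with h8 | ⟨g, hg, hrg⟩
        · omega
        · exact c1 (List.mem_map.mpr ⟨g, hg, pvRankD_inv_1 g (hrg.trans hmj)⟩)
      have hne2 : files.foldl pvStep 8 ≠ 2 := by
        intro hmj
        rcases pv_fold_cases files 8 with h8 | ⟨g, hg, hrg⟩
        · omega
        · exact c2 (List.mem_map.mpr ⟨g, hg, pvRankD_inv_2 g (hrg.trans hmj)⟩)
      have hne3 : files.foldl pvStep 8 ≠ 3 := by
        intro hmj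
        rcases pv_fold_cases files 8 with h8 | ⟨g, hg, hrg⟩
        · omega
        · exact c3 (List.mem_map.mpr ⟨g, hg, pvRankD_inv_3 g (hrg.trans hmj)⟩)
      have hne4 : files.foldl pvStep 8 ≠ 4 := by
        intro hmj
        rcases pv_fold_cases files 8 with h8 | ⟨g, hg, hrg⟩
        · omega
        · exact c4 (List.mem_map.mpr ⟨g, hg, pvRankD_inv_4 g (hrg.trans hmj)⟩)
      omega
    rw [hm]
    simp only [if_pos c5, if_neg c0, if_neg c1, if_neg c2, if_neg c3, if_neg c4]
    decide
  by_cases c6 : "build.gradle" ∈ files.map (fun f => PySem.Str.lower f)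
  · have hm : files.foldl pvStep 8 = 6 := by
      obtain ⟨f, hf, hlf⟩ := List.mem_map.mp c6
      have hle : files.foldl pvStep 8 ≤ 6 := by
        have h1 := pv_fold_le files 8 f hf
        rwa [pvRankD_fwd_6 f hlf] at h1
      have hne0 : files.foldl pvStep 8 ≠ 0 := by
        intro hmj
        rcases pv_fold_cases files 8 with h8 | ⟨g, hg, hrg⟩
        · omega
        · exact c0 (List.mem_map.mpr ⟨g, hg, pvRankD_inv_0 g (hrg.trans hmj)⟩)
      have hne1 : files.foldl pvStep 8 ≠ 1 := by
        intro hmj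
        rcases pv_fold_cases files 8 with h8 | ⟨g, hg, hrg⟩
        · omega
        · exact c1 (List.mem_map.mpr ⟨g, hg, pvRankD_inv_1 g (hrg.trans hmj)⟩)
      have hne2 : files.foldl pvStep 8 ≠ 2 := by
        intro hmj
        rcases pv_fold_cases files 8 with h8 | ⟨g, hg, hrg⟩
        · omega
        · exact c2 (List.mem_map.mpr ⟨g, hg, pvRankD_inv_2 g (hrg.trans hmj)⟩)
      have hne3 : files.foldl pvStep 8 ≠ 3 := by
        intro hmj
        rcases pv_fold_cases files 8 with h8 | ⟨g, hg, hrg⟩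
        · omega
        · exact c3 (List.mem_map.mpr ⟨g, hg, pvRankD_inv_3 g (hrg.trans hmj)⟩)
      have hne4 : files.foldl pvStep 8 ≠ 4 := by
        intro hmj
        rcases pv_fold_cases files 8 with h8 | ⟨g, hg, hrg⟩
        · omega
        · exact c4 (List.mem_map.mpr ⟨g, hg, pvRankD_inv_4 g (hrg.trans hmj)⟩)
      have hne5 : files.foldl pvStep 8 ≠ 5 := by
        intro hmj
        rcases pv_fold_cases files 8 with h8 | ⟨g, hg, hrg⟩
        · omega
        · exact c5 (List.mem_map.mpr ⟨g, hg, pvRankD_inv_5 g (hrg.trans hmj)⟩)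
      omega
    rw [hm]
    simp only [if_pos c6, if_neg c0, if_neg c1, if_neg c2, if_neg c3, if_neg c4, if_neg c5]
    decide
  by_cases c7 : "pom.xml" ∈ files.map (fun f => PySem.Str.lower f)
  · have hm : files.foldl pvStep 8 = 7 := by
      obtain ⟨f, hf, hlf⟩ := List.mem_map.mp c7
      have hle : files.foldl pvStep 8 ≤ 7 := by
        have h1 := pv_fold_le files 8 f hf
        rwa [pvRankD_fwd_7 f hlf] at h1
      have hne0 : files.foldl pvStep 8 ≠ 0 := by
        intro hmj
        rcases pv_fold_cases files 8 with h8 | ⟨g, hg, hrg⟩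
        · omega
        · exact c0 (List.mem_map.mpr ⟨g, hg, pvRankD_inv_0 g (hrg.trans hmj)⟩)
      have hne1 : files.foldl pvStep 8 ≠ 1 := by
        intro hmj
        rcases pv_fold_cases files 8 with h8 | ⟨g, hg, hrg⟩
        · omega
        · exact c1 (List.mem_map.mpr ⟨g, hg, pvRankD_inv_1 g (hrg.trans hmj)⟩)
      have hne2 : files.foldl pvStep 8 ≠ 2 := by
        intro hmj
        rcases pv_fold_cases files 8 with h8 | ⟨g, hg, hrg⟩
        · omega
        · exact c2 (List.mem_map.mpr ⟨g, hg, pvRankD_inv_2 g (hrg.trans hmj)⟩)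
      have hne3 : files.foldl pvStep 8 ≠ 3 := by
        intro hmj
        rcases pv_fold_cases files 8 with h8 | ⟨g, hg, hrg⟩
        · omega
        · exact c3 (List.mem_map.mpr ⟨g, hg, pvRankD_inv_3 g (hrg.trans hmj)⟩)
      have hne4 : files.foldl pvStep 8 ≠ 4 := by
        intro hmj
        rcases pv_fold_cases files 8 with h8 | ⟨g, hg, hrg⟩
        · omega
        · exact c4 (List.mem_map.mpr ⟨g, hg, pvRankD_inv_4 g (hrg.trans hmj)⟩)
      have hne5 : files.foldl pvStep 8 ≠ 5 := by
        intro hmj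
        rcases pv_fold_cases files 8 with h8 | ⟨g, hg, hrg⟩
        · omega
        · exact c5 (List.mem_map.mpr ⟨g, hg, pvRankD_inv_5 g (hrg.trans hmj)⟩)
      have hne6 : files.foldl pvStep 8 ≠ 6 := by
        intro hmj
        rcases pv_fold_cases files 8 with h8 | ⟨g, hg, hrg⟩
        · omega
        · exact c6 (List.mem_map.mpr ⟨g, hg, pvRankD_inv_6 g (hrg.trans hmj)⟩)
      omega
    rw [hm]
    simp only [if_pos c7, if_neg c0, if_neg c1, if_neg c2, if_neg c3, if_neg c4, if_neg c5, if_neg c6]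
    decide
  have hm : files.foldl pvStep 8 = 8 := by
    have hle := pv_fold_le_init files 8
    rcases pv_fold_cases files 8 with h8 | ⟨g, hg, hrg⟩
    · exact h8
    · by_contra hne
      interval_cases h : files.foldl pvStep 8
      · exact c0 (List.mem_map.mpr ⟨g, hg, pvRankD_inv_0 g hrg⟩)
      · exact c1 (List.mem_map.mpr ⟨g, hg, pvRankD_inv_1 g hrg⟩)
      · exact c2 (List.mem_map.mpr ⟨g, hg, pvRankD_inv_2 g hrg⟩)
      · exact c3 (List.mem_map.mpr ⟨g, hg, pvRankD_inv_3 g hrg⟩)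
      · exact c4 (List.mem_map.mpr ⟨g, hg, pvRankD_inv_4 g hrg⟩)
      · exact c5 (List.mem_map.mpr ⟨g, hg, pvRankD_inv_5 g hrg⟩)
      · exact c6 (List.mem_map.mpr ⟨g, hg, pvRankD_inv_6 g hrg⟩)
      · exact c7 (List.mem_map.mpr ⟨g, hg, pvRankD_inv_7 g hrg⟩)
      · exact hne rfl
  rw [hm]
  simp only [if_neg c0, if_neg c1, if_neg c2, if_neg c3, if_neg c4, if_neg c5, if_neg c6, if_neg c7]
  decide

-- ===== VERDICT (by name: the statement is the Claim_ definition above) =====
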